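-- pv_equiv track=rewrite | github.com/matteodalfarra/Algorithms | Codewars/Python/6 kyu/Split Strings/main.py | solution
-- ===== SOURCE A (Python) =====
-- def solution(s):
--     if len(s) > 0:
--         couple = []
--
--         for i in range(0,len(s),2):
--             couple.append(s[i:i+2])
--
--         if len(couple[-1]) == 1:
--             couple[-1] += "_"
--         return couple
--     else:
--         return []
-- ===== SOURCE B (Python) =====
-- def solution(s):
--     evens = s[::2]
--     odds = s[1::2]
--     result = [a + b for a, b in zip(evens, odds)]
--     if len(s) % 2:
--         result.append(s[-1] + "_")
--     return result
-- ===== Notes on version B (the rewrite author's own statement) =====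
-- stated objective: idiomatic
-- what changed: Replaces the index-stride loop of two-character slices plus post-hoc mutation of the last element with zipping the even- and odd-indexed strided views and appending the padded leftover character for odd lengths.
import Mathlib
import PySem

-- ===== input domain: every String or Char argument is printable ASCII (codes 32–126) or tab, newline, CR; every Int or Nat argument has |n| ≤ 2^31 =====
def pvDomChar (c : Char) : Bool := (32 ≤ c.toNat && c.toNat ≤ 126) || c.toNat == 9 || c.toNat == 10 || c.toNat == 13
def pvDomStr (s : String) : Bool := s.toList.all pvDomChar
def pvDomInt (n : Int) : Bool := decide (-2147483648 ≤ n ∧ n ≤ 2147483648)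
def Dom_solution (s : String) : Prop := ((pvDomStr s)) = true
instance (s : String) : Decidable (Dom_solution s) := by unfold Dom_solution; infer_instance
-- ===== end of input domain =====

-- B splits the string by zipping the even- and odd-indexed strided views and appending the
-- padded leftover character for odd lengths, instead of A's stride-2 index loop of slices
-- plus post-hoc mutation of the last element (idiomatic; same O(n) cost).

-- ===== PORT A =====
def solution (s : String) : List String :=
  let cs := s.toList
  if cs.length > 0 then
    let couple : List (List Char) :=
      (PySem.List.pyRange 0 (cs.length : Int) 2).foldl
        (fun acc i => acc ++ [PySem.List.slice cs (some i) (some (i + 2))]) []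
    let couple :=
      match PySem.List.pyGet? couple (-1) with
      | some last => if last.length == 1 then couple.dropLast ++ [last ++ ['_']] else couple
      | none => couple
    couple.map String.ofList
  else []

-- ===== PORT B =====
def solution_alt (s : String) : List String :=
  let cs := s.toList
  let evens := (PySem.List.slice? cs none none 2).getD []
  let odds := (PySem.List.slice? cs (some 1) none 2).getD []
  let result := (evens.zip odds).map (fun p => String.ofList [p.1, p.2])
  if cs.length % 2 == 1 then
    match PySem.List.pyGet? cs (-1) with
    | some c => result ++ [String.ofList [c, '_']]
    | none => result
  else result

-- ===== PRECONDITION & SPEC =====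
def Spec_solution (s : String) (out : List String) : Prop := out = solution_alt s
instance (s : String) (out : List String) : Decidable (Spec_solution s out) := by unfold Spec_solution; infer_instance

-- ===== CLAIM (what is proved, stated in full; the proofs are below) =====
def Claim_equal_solution : Prop := ∀ (s : String), Dom_solution s → Spec_solution s (solution s)

-- ===== LEMMAS AND PROOFS =====

/-- Two-at-a-time pairing with '_' padding: the common value of both programs. -/
def pvPairs : List Char → List (List Char)
  | [] => []
  | [a] => [[a, '_']]
  | a :: b :: t => [a, b] :: pvPairs t

/-- The unpadded couples A's loop builds. -/
def pvCouples : List Char → List (List Char)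
  | [] => []
  | [a] => [[a]]
  | a :: b :: t => [a, b] :: pvCouples t

/-- Even-indexed characters (s[::2]). -/
def pvEvens : List Char → List Char
  | [] => []
  | [a] => [a]
  | a :: _ :: t => a :: pvEvens t

/-- Odd-indexed characters (s[1::2]). -/
def pvOdds : List Char → List Char
  | [] => []
  | [_] => []
  | _ :: b :: t => b :: pvOdds t

lemma pvCouples_ne_nil (cs : List Char) (h : cs ≠ []) : pvCouples cs ≠ [] := by
  match cs with
  | [] => exact absurd rfl h
  | [a] => simp [pvCouples]
  | a :: b :: t => simp [pvCouples]

lemma range_map_take_eq_couples (cs : List Char) :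
    (List.range ((cs.length + 1) / 2)).map (fun k => (cs.drop (2 * k)).take 2) = pvCouples cs := by
  match cs with
  | [] => simp [pvCouples]
  | [a] => simp [pvCouples]
  | a :: b :: t =>
    have ih := range_map_take_eq_couples t
    have hm : ((a :: b :: t).length + 1) / 2 = (t.length + 1) / 2 + 1 := by
      simp only [List.length_cons]; omega
    rw [hm, List.range_succ_eq_map, List.map_cons, List.map_map, pvCouples]
    refine congrArg₂ _ (by simp) ?_
    rw [← ih]
    refine List.map_congr_left fun k _ => ?_
    show List.take 2 (List.drop (2 * (k + 1)) (a :: b :: t)) = _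
    rw [show 2 * (k + 1) = 2 * k + 1 + 1 by omega]
    simp [List.drop_succ_cons]

lemma couples_loop_eq (cs : List Char) :
    (PySem.List.pyRange 0 (cs.length : Int) 2).foldl
        (fun acc i => acc ++ [PySem.List.slice cs (some i) (some (i + 2))]) []
      = pvCouples cs := by
  rw [PySem.List.pyRange_of_pos 0 (cs.length : Int) (by omega)]
  have hcnt : (if (0:Int) < cs.length then (((cs.length : Int) - 0 + 2 - 1) / 2).toNat else 0)
      = (cs.length + 1) / 2 := by
    split <;> omega
  rw [hcnt, PySem.List.foldl_append_singleton_eq_map, List.map_map,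
    ← range_map_take_eq_couples cs]
  refine congrArg _ (List.map_congr_left fun k _ => ?_)
  show PySem.List.slice cs (some (0 + 2 * (k:Int))) (some (0 + 2 * (k:Int) + 2)) = _
  rw [show (0 + 2 * (k:Int)) = ((2*k : Nat) : Int) by push_cast; ring,
      show (((2*k : Nat) : Int) + 2) = (((2*k+2 : Nat)) : Int) by push_cast; ring,
      PySem.List.slice_natCast]
  congr 1
  omega

lemma fix_couples_eq_pairs (cs : List Char) (h : cs ≠ []) :
    (match (pvCouples cs).getLast? with
      | some last => if last.length == 1 then (pvCouples cs).dropLast ++ [last ++ ['_']]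
                     else pvCouples cs
      | none => pvCouples cs) = pvPairs cs := by
  match cs with
  | [a] => simp [pvCouples, pvPairs]
  | [a, b] => simp [pvCouples, pvPairs]
  | a :: b :: c :: t =>
    have ih := fix_couples_eq_pairs (c :: t) (by simp)
    have hne := pvCouples_ne_nil (c :: t) (by simp)
    rw [pvPairs, ← ih, pvCouples]
    have hgl : ([a, b] :: pvCouples (c :: t)).getLast? = (pvCouples (c :: t)).getLast? := by
      cases hpc : pvCouples (c :: t) with
      | nil => exact absurd hpc hne
      | cons y ys => simp [List.getLast?_cons_cons]
    rw [hgl, List.dropLast_cons_of_ne_nil hne]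
    rcases hl : (pvCouples (c :: t)).getLast? with _ | last
    · simp_all
    · simp only []
      split <;> simp

lemma filterMap_range_evens (cs : List Char) :
    List.filterMap (fun k : Nat => cs[2 * k]?) (List.range ((cs.length + 1) / 2)) = pvEvens cs := by
  match cs with
  | [] => simp [pvEvens]
  | [a] => simp [pvEvens]
  | a :: b :: t =>
    have ih := filterMap_range_evens t
    have hm : ((a :: b :: t).length + 1) / 2 = (t.length + 1) / 2 + 1 := by
      simp only [List.length_cons]; omega
    rw [hm, List.range_succ_eq_map, List.filterMap_cons, pvEvens]
    simp only [Nat.mul_zero, List.getElem?_cons_zero, List.filterMap_map]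
    refine congrArg _ ?_
    rw [← ih]
    refine List.filterMap_congr fun k _ => ?_
    show (a :: b :: t)[2 * (k + 1)]? = t[2 * k]?
    rw [show 2 * (k + 1) = 2 * k + 1 + 1 by omega]
    simp

lemma evens_eq (cs : List Char) :
    (PySem.List.slice? cs none none 2).getD [] = pvEvens cs := by
  have h : PySem.List.slice? cs none none 2
      = some (List.filterMap (fun k : Nat => cs[2 * k]?) (List.range ((cs.length + 1) / 2))) := by
    simp only [PySem.List.slice?, PySem.List.sliceIndices]
    norm_num
    rw [show (if 0 < cs.length then (((cs.length : Int) + 2 - 1) / 2).toNat else 0)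
        = (cs.length + 1) / 2 by split <;> omega]
    exact List.filterMap_congr fun k _ => by congr 1
  rw [h, Option.getD_some, filterMap_range_evens]

lemma pvOdds_cons (a : Char) (t : List Char) : pvOdds (a :: t) = pvEvens t := by
  match t with
  | [] => simp [pvOdds, pvEvens]
  | [b] => simp [pvOdds, pvEvens]
  | b :: c :: t' =>
    have ih := pvOdds_cons c t'
    rw [pvOdds, pvEvens, ih]

lemma odds_eq (cs : List Char) :
    (PySem.List.slice? cs (some 1) none 2).getD [] = pvOdds cs := by
  match cs with
  | [] => decide
  | a :: t =>
    have h : PySem.List.slice? (a :: t) (some 1) none 2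
        = some (List.filterMap (fun k : Nat => t[2 * k]?) (List.range ((t.length + 1) / 2))) := by
      simp only [PySem.List.slice?, PySem.List.sliceIndices]
      norm_num
      rw [show (if 0 < t.length then (((t.length : Int) + 2 - 1) / 2).toNat else 0)
          = (t.length + 1) / 2 by split <;> omega]
      refine List.filterMap_congr fun k _ => ?_
      rw [show (1 + 2 * (k : Int)).toNat = 2 * k + 1 by omega]
      simp
    rw [h, Option.getD_some, filterMap_range_evens t, pvOdds_cons]

lemma zip_pad_eq_pairs (cs : List Char) :
    (if cs.length % 2 == 1 then
      (match PySem.List.pyGet? cs (-1) with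
        | some c => ((pvEvens cs).zip (pvOdds cs)).map (fun p => String.ofList [p.1, p.2])
            ++ [String.ofList [c, '_']]
        | none => ((pvEvens cs).zip (pvOdds cs)).map (fun p => String.ofList [p.1, p.2]))
     else ((pvEvens cs).zip (pvOdds cs)).map (fun p => String.ofList [p.1, p.2]))
      = (pvPairs cs).map String.ofList := by
  match cs with
  | [] => simp [pvEvens, pvOdds, pvPairs]
  | [a] => simp [pvEvens, pvOdds, pvPairs, PySem.List.pyGet?_neg_one]
  | a :: b :: t =>
    have ih := zip_pad_eq_pairs t
    rw [pvPairs, List.map_cons]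
    simp only [pvEvens, pvOdds, List.zip_cons_cons, List.map_cons]
    have hpar : ((a :: b :: t).length % 2 == 1) = (t.length % 2 == 1) := by
      simp only [List.length_cons]; congr 1; omega
    rw [hpar]
    by_cases hp : (t.length % 2 == 1) = true
    · rw [if_pos hp] at ih ⊢
      have ht : t ≠ [] := by
        intro h; subst h; simp at hp
      have hgl : PySem.List.pyGet? (a :: b :: t) (-1) = PySem.List.pyGet? t (-1) := by
        rw [PySem.List.pyGet?_neg_one, PySem.List.pyGet?_neg_one]
        cases t with
        | nil => exact absurd rfl ht
        | cons c t' => simp [List.getLast?_cons_cons]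
      rw [hgl]
      rcases hx : PySem.List.pyGet? t (-1) with _ | c <;> rw [hx] at ih <;> simp only []
      · simp only [] at ih; rw [ih]
      · simp only [] at ih; rw [List.cons_append, ← ih]
    · rw [if_neg hp] at ih ⊢
      rw [ih]

lemma solution_alt_eq_pairs (s : String) :
    solution_alt s = (pvPairs s.toList).map String.ofList := by
  rw [solution_alt]
  simp only [evens_eq, odds_eq]
  exact zip_pad_eq_pairs s.toList

lemma solution_eq_pairs (s : String) :
    solution s = (pvPairs s.toList).map String.ofList := by
  rw [solution]
  by_cases h : s.toList = []
  · simp [h, pvPairs]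
  · simp only [couples_loop_eq]
    rw [if_pos (List.length_pos_iff.mpr h), PySem.List.pyGet?_neg_one]
    rw [fix_couples_eq_pairs s.toList h]

-- ===== VERDICT (by name: the statement is the Claim_ definition above) =====
theorem solution_spec : Claim_equal_solution := by
  intro s _
  unfold Spec_solution
  rw [solution_eq_pairs, solution_alt_eq_pairs]
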